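-- pv_equiv track=rewrite | github.com/maxwell142857/algo-python | contest/contest385/q3.py | mostFrequentPrime
-- ===== SOURCE A (Python) =====
-- from typing import List
--
-- def mostFrequentPrime(mat: List[List[int]]) -> int:
--     direction = [[0,1],[0,-1],[1,0],[-1,0],[1,1],[-1,-1],[1,-1],[-1,1]]
--     rowCnt = len(mat)
--     colCnt = len(mat[0])
--     number2frequency = {}
--
--     def DFS(r,c,val,direct):
--         val  = val*10+mat[r][c]
--         if val > 10:
--             number2frequency[val] = number2frequency.get(val,0)+1
--         nextR = r+direct[0]
--         nextC = c+direct[1]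
--         if 0<=nextR<rowCnt and 0<=nextC<colCnt:
--             DFS(nextR,nextC,val,direct)
--
--     def checkPrime(number):
--         mod = 2
--         while mod*mod <= number:
--             if number%mod==0:
--                 return False
--             mod += 1
--         return True
--
--     for i in range(rowCnt):
--         for j in range(colCnt):
--             for index in range(len(direction)):
--                 DFS(i,j,0,direction[index])
--
--     ansKey = -1
--     ansVal = 0
--     for key,val in number2frequency.items():
--         if checkPrime(key):
--             if val > ansVal or (val==ansVal and key > ansKey):
--                 ansKey = key
--                 ansVal = val
--
--     return ansKey
-- ===== SOURCE B (Python) =====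
-- from typing import List
--
-- def mostFrequentPrime(mat: List[List[int]]) -> int:
--     rowCnt = len(mat)
--     colCnt = len(mat[0])
--
--     # Phase 1: collect every path value (> 10) by an iterative walk per (cell, direction).
--     vals = []
--     for i in range(rowCnt):
--         for j in range(colCnt):
--             for dr, dc in ((0, 1), (0, -1), (1, 0), (-1, 0), (1, 1), (-1, -1), (1, -1), (-1, 1)):
--                 v, r, c = 0, i, j
--                 while 0 <= r < rowCnt and 0 <= c < colCnt:
--                     v = v * 10 + mat[r][c]
--                     if v > 10:
--                         vals.append(v)
--                     r += dr
--                     c += dc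
--
--     # Phase 2: count.
--     freq = {}
--     for v in vals:
--         freq[v] = freq.get(v, 0) + 1
--
--     # Phase 3: pick the (frequency, value) lexicographic maximum among prime keys.
--     def checkPrime(number):
--         mod = 2
--         while mod * mod <= number:
--             if number % mod == 0:
--                 return False
--             mod += 1
--         return True
--
--     best = max(((f, k) for k, f in freq.items() if checkPrime(k)), default=(0, -1))
--     return best[1]
-- ===== Notes on version B (the rewrite author's own statement) =====
-- stated objective: alternative
-- what changed: The recursive DFS that threads a mutating frequency dict is replaced by a three-phase pipeline: an iterative bounded walk per (cell, direction) collects all path values into a list, a separate pass counts them, and the answer is picked as the (frequency, value) lexicographic max over prime keys via Python's max() with a default instead of A's manual running-best fold.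
import Mathlib
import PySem

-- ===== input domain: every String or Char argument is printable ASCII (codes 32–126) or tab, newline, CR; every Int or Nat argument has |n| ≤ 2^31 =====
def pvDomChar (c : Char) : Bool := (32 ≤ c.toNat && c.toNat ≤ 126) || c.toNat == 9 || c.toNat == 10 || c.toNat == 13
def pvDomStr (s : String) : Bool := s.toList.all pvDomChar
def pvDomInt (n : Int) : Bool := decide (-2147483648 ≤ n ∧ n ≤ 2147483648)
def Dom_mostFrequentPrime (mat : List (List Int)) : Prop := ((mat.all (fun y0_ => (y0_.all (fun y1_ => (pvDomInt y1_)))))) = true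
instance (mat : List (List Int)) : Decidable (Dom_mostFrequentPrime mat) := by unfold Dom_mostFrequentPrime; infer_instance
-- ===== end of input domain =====

-- B replaces A's recursive, dict-threading DFS by a collect-then-count-then-max pipeline (alternative decomposition, same cost).

-- ===== PORT A =====
-- shared helper: both Pythons contain the identical 'checkPrime' trial-division loop; fuel n.toNat
-- bounds the iteration count (mod runs from 2 while mod*mod <= n, so at most n.toNat iterations).
def pvPrimeLoop (mat_unused : Unit) : Nat → Int → Int → Bool
  | 0, _, _ => true
  | fuel+1, md, n =>
      if md * md ≤ n then
        (if PySem.Int.mod n md = 0 then false else pvPrimeLoop mat_unused fuel (md + 1) n)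
      else true

def pvCheckPrime (n : Int) : Bool := pvPrimeLoop () n.toNat 2 n

def pvDirection : List (Int × Int) :=
  [(0,1), (0,-1), (1,0), (-1,0), (1,1), (-1,-1), (1,-1), (-1,1)]

-- A's DFS: processes the current cell, then recurses while the next cell is in bounds.
-- Fuel (rowCnt+colCnt).toNat bounds the path length (a nonzero direction component advances every step).
def pvDfs (mat : List (List Int)) (rowCnt colCnt dr dc : Int) :
    Nat → Int → Int → Int → PySem.Dict Int Int → PySem.Dict Int Int
  | 0, _, _, _, d => d
  | fuel+1, r, c, val, d =>
      let v := val * 10 + PySem.List.pyGetD (PySem.List.pyGetD mat r []) c 0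
      let d' := if v > 10 then d.insert v (d.getD v 0 + 1) else d
      let nr := r + dr
      let nc := c + dc
      if 0 ≤ nr ∧ nr < rowCnt ∧ 0 ≤ nc ∧ nc < colCnt then
        pvDfs mat rowCnt colCnt dr dc fuel nr nc v d'
      else d'

def mostFrequentPrime (mat : List (List Int)) : Int :=
  let rowCnt : Int := mat.length
  let colCnt : Int := (PySem.List.pyGetD mat 0 []).length
  let number2frequency : PySem.Dict Int Int :=
    (PySem.List.pyRange 0 rowCnt 1).foldl (fun d i =>
      (PySem.List.pyRange 0 colCnt 1).foldl (fun d j =>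
        (PySem.List.pyRange 0 pvDirection.length 1).foldl (fun d index =>
          let direct := PySem.List.pyGetD pvDirection index (0, 0)
          pvDfs mat rowCnt colCnt direct.1 direct.2 (rowCnt + colCnt).toNat i j 0 d) d) d)
      PySem.Dict.empty
  let ans :=
    number2frequency.items.foldl (fun s kv =>
      if pvCheckPrime kv.1 then
        (if kv.2 > s.2 ∨ (kv.2 = s.2 ∧ kv.1 > s.1) then (kv.1, kv.2) else s)
      else s) ((-1 : Int), (0 : Int))
  ans.1

-- ===== PORT B =====
-- B's inner while-loop: checks bounds at the top, appends each path value > 10; same fuel bound.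
def pvWalk (mat : List (List Int)) (rowCnt colCnt dr dc : Int) :
    Nat → Int → Int → Int → List Int
  | 0, _, _, _ => []
  | fuel+1, r, c, v =>
      if 0 ≤ r ∧ r < rowCnt ∧ 0 ≤ c ∧ c < colCnt then
        let v' := v * 10 + PySem.List.pyGetD (PySem.List.pyGetD mat r []) c 0
        (if v' > 10 then [v'] else []) ++ pvWalk mat rowCnt colCnt dr dc fuel (r + dr) (c + dc) v'
      else []

def mostFrequentPrime_alt (mat : List (List Int)) : Int :=
  let rowCnt : Int := mat.length
  let colCnt : Int := (PySem.List.pyGetD mat 0 []).length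
  -- Phase 1: collect every path value (vals.append in nested loops)
  let vals : List Int :=
    (PySem.List.pyRange 0 rowCnt 1).foldl (fun a i =>
      (PySem.List.pyRange 0 colCnt 1).foldl (fun a j =>
        pvDirection.foldl (fun a dir =>
          a ++ pvWalk mat rowCnt colCnt dir.1 dir.2 (rowCnt + colCnt).toNat i j 0) a) a) []
  -- Phase 2: count (freq[v] = freq.get(v, 0) + 1)
  let freq : PySem.Dict Int Int :=
    vals.foldl (fun d v => d.insert v (d.getD v 0 + 1)) PySem.Dict.empty
  -- Phase 3: Python max(..., default=(0,-1)) over (f, k) pairs for prime k;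
  -- tuple '>' on int pairs is lexicographic, expanded componentwise below.
  let pairs : List (Int × Int) :=
    (freq.items.filter (fun kv => pvCheckPrime kv.1)).map (fun kv => (kv.2, kv.1))
  let best : Int × Int :=
    match pairs with
    | [] => ((0 : Int), (-1 : Int))
    | h :: t => t.foldl (fun b p => if p.1 > b.1 ∨ (p.1 = b.1 ∧ p.2 > b.2) then p else b) h
  best.2

-- ===== PRECONDITION & SPEC =====
-- Pre_ excludes exactly the inputs where A raises IndexError: the empty matrix (mat[0]) and
-- matrices with a row shorter than row 0 (mat[r][c] for c < len(mat[0])).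
def Pre_mostFrequentPrime (mat : List (List Int)) : Prop :=
  mat ≠ [] ∧ ∀ row ∈ mat, (PySem.List.pyGetD mat 0 []).length ≤ row.length
instance (mat : List (List Int)) : Decidable (Pre_mostFrequentPrime mat) := by
  unfold Pre_mostFrequentPrime; infer_instance

def pvWitness_mostFrequentPrime : List (List Int) := [[2, 3], [5, 7]]

def Spec_mostFrequentPrime (mat : List (List Int)) (out : Int) : Prop := out = mostFrequentPrime_alt mat
instance (mat : List (List Int)) (out : Int) : Decidable (Spec_mostFrequentPrime mat out) := by
  unfold Spec_mostFrequentPrime; infer_instance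

-- ===== CLAIM (what is proved, stated in full; the proofs are below) =====
def Claim_equal_mostFrequentPrime : Prop := ∀ (mat : List (List Int)), Dom_mostFrequentPrime mat → Pre_mostFrequentPrime mat → Spec_mostFrequentPrime mat (mostFrequentPrime mat)

-- ===== LEMMAS AND PROOFS =====

-- a walk started out of bounds is empty
theorem pvWalk_out (mat : List (List Int)) (rowCnt colCnt dr dc : Int) (fuel : Nat)
    (r c v : Int) (h : ¬ (0 ≤ r ∧ r < rowCnt ∧ 0 ≤ c ∧ c < colCnt)) :
    pvWalk mat rowCnt colCnt dr dc fuel r c v = [] := by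
  cases fuel with
  | zero => rfl
  | succ n => simp [pvWalk, h]

-- A's DFS from an in-bounds cell folds the counting update over B's walk list (same fuel)
theorem pvDfs_eq_foldl_walk (mat : List (List Int)) (rowCnt colCnt dr dc : Int) :
    ∀ (fuel : Nat) (r c v : Int) (d : PySem.Dict Int Int),
      (0 ≤ r ∧ r < rowCnt ∧ 0 ≤ c ∧ c < colCnt) →
      pvDfs mat rowCnt colCnt dr dc fuel r c v d =
        (pvWalk mat rowCnt colCnt dr dc fuel r c v).foldl
          (fun d x => d.insert x (d.getD x 0 + 1)) d := by
  intro fuel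
  induction fuel with
  | zero => intro r c v d _; rfl
  | succ n ih =>
    intro r c v d hin
    simp only [pvDfs, pvWalk, hin]
    by_cases hnext : (0 ≤ r + dr ∧ r + dr < rowCnt ∧ 0 ≤ c + dc ∧ c + dc < colCnt)
    · rw [if_pos hnext, ih _ _ _ _ hnext]
      by_cases hv : v * 10 + PySem.List.pyGetD (PySem.List.pyGetD mat r []) c 0 > 10 <;>
        simp [hv]
    · rw [if_neg hnext, pvWalk_out mat rowCnt colCnt dr dc n _ _ _ hnext]
      by_cases hv : v * 10 + PySem.List.pyGetD (PySem.List.pyGetD mat r []) c 0 > 10 <;>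
        simp [hv]

-- folding a per-item inner fold is folding over the flattened list
theorem foldl_foldl_eq_flatMap {ι : Type} (g : ι → List Int) (L : List ι)
    (d : PySem.Dict Int Int) :
    L.foldl (fun d x => (g x).foldl (fun d y => d.insert y (d.getD y 0 + 1)) d) d =
      (L.flatMap g).foldl (fun d y => d.insert y (d.getD y 0 + 1)) d :=
  (List.foldl_flatMap).symm

-- the two dictionary-building phases produce the same dictionary
theorem pvDict_eq (mat : List (List Int)) (rowCnt colCnt : Int) (F : Nat) :
    (PySem.List.pyRange 0 rowCnt 1).foldl (fun d i =>
      (PySem.List.pyRange 0 colCnt 1).foldl (fun d j =>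
        (PySem.List.pyRange 0 pvDirection.length 1).foldl (fun d index =>
          let direct := PySem.List.pyGetD pvDirection index (0, 0)
          pvDfs mat rowCnt colCnt direct.1 direct.2 F i j 0 d) d) d)
      PySem.Dict.empty =
    ((PySem.List.pyRange 0 rowCnt 1).foldl (fun a i =>
      (PySem.List.pyRange 0 colCnt 1).foldl (fun a j =>
        pvDirection.foldl (fun a dir =>
          a ++ pvWalk mat rowCnt colCnt dir.1 dir.2 F i j 0) a) a) []).foldl
      (fun d v => d.insert v (d.getD v 0 + 1)) PySem.Dict.empty := by
  -- B's nested append-folds are flatMaps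
  have h1 : ∀ (a : List Int) (i j : Int),
      pvDirection.foldl (fun a dir =>
        a ++ pvWalk mat rowCnt colCnt dir.1 dir.2 F i j 0) a =
      a ++ pvDirection.flatMap (fun dir => pvWalk mat rowCnt colCnt dir.1 dir.2 F i j 0) :=
    fun a i j => PySem.List.foldl_append_eq_flatMap _ _ _
  have h2 : ∀ (a : List Int) (i : Int),
      (PySem.List.pyRange 0 colCnt 1).foldl (fun a j =>
        pvDirection.foldl (fun a dir =>
          a ++ pvWalk mat rowCnt colCnt dir.1 dir.2 F i j 0) a) a =
      a ++ (PySem.List.pyRange 0 colCnt 1).flatMap (fun j =>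
        pvDirection.flatMap (fun dir => pvWalk mat rowCnt colCnt dir.1 dir.2 F i j 0)) := by
    intro a i
    exact (PySem.List.foldl_congr_mem _ _
      (fun a j => a ++ pvDirection.flatMap (fun dir => pvWalk mat rowCnt colCnt dir.1 dir.2 F i j 0)) _
      (by intro acc x _; exact h1 acc i x)).trans (PySem.List.foldl_append_eq_flatMap _ _ _)
  have hB : (PySem.List.pyRange 0 rowCnt 1).foldl (fun a i =>
      (PySem.List.pyRange 0 colCnt 1).foldl (fun a j =>
        pvDirection.foldl (fun a dir =>
          a ++ pvWalk mat rowCnt colCnt dir.1 dir.2 F i j 0) a) a) [] =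
      (PySem.List.pyRange 0 rowCnt 1).flatMap (fun i =>
        (PySem.List.pyRange 0 colCnt 1).flatMap (fun j =>
          pvDirection.flatMap (fun dir => pvWalk mat rowCnt colCnt dir.1 dir.2 F i j 0))) := by
    refine (PySem.List.foldl_congr_mem _ _
      (fun a i => a ++ (PySem.List.pyRange 0 colCnt 1).flatMap (fun j =>
        pvDirection.flatMap (fun dir => pvWalk mat rowCnt colCnt dir.1 dir.2 F i j 0))) _
      (by intro acc x _; exact h2 acc x)).trans ?_
    simpa using PySem.List.foldl_append_eq_flatMap _ _ ([] : List Int)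
  rw [hB]
  -- A's index fold over directions is a fold over the direction list
  have hdir : ∀ (d : PySem.Dict Int Int) (i j : Int),
      (PySem.List.pyRange 0 pvDirection.length 1).foldl (fun d index =>
        let direct := PySem.List.pyGetD pvDirection index (0, 0)
        pvDfs mat rowCnt colCnt direct.1 direct.2 F i j 0 d) d =
      pvDirection.foldl (fun d dir => pvDfs mat rowCnt colCnt dir.1 dir.2 F i j 0 d) d := by
    intro d i j
    conv_rhs => rw [← PySem.List.map_pyGetD_pyRange_zero' pvDirection ((0 : Int), (0 : Int))]
    rw [List.foldl_map]
  -- replace each DFS by the fold over its walk and flatten, level by level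
  have hA1 : ∀ (d : PySem.Dict Int Int) (i j : Int),
      (0 ≤ i ∧ i < rowCnt) → (0 ≤ j ∧ j < colCnt) →
      pvDirection.foldl (fun d dir => pvDfs mat rowCnt colCnt dir.1 dir.2 F i j 0 d) d =
      (pvDirection.flatMap (fun dir => pvWalk mat rowCnt colCnt dir.1 dir.2 F i j 0)).foldl
        (fun d v => d.insert v (d.getD v 0 + 1)) d := by
    intro d i j hi hj
    exact (PySem.List.foldl_congr_mem _ _
      (fun d dir => (pvWalk mat rowCnt colCnt dir.1 dir.2 F i j 0).foldl
        (fun d v => d.insert v (d.getD v 0 + 1)) d) _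
      (by intro acc dir _
          exact pvDfs_eq_foldl_walk mat rowCnt colCnt dir.1 dir.2 F i j 0 acc
            ⟨hi.1, hi.2, hj.1, hj.2⟩)).trans (foldl_foldl_eq_flatMap _ _ _)
  have hA2 : ∀ (d : PySem.Dict Int Int) (i : Int), (0 ≤ i ∧ i < rowCnt) →
      (PySem.List.pyRange 0 colCnt 1).foldl (fun d j =>
        (PySem.List.pyRange 0 pvDirection.length 1).foldl (fun d index =>
          let direct := PySem.List.pyGetD pvDirection index (0, 0)
          pvDfs mat rowCnt colCnt direct.1 direct.2 F i j 0 d) d) d =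
      ((PySem.List.pyRange 0 colCnt 1).flatMap (fun j =>
        pvDirection.flatMap (fun dir => pvWalk mat rowCnt colCnt dir.1 dir.2 F i j 0))).foldl
        (fun d v => d.insert v (d.getD v 0 + 1)) d := by
    intro d i hi
    exact (PySem.List.foldl_congr_mem _ _
      (fun d j => (pvDirection.flatMap (fun dir => pvWalk mat rowCnt colCnt dir.1 dir.2 F i j 0)).foldl
        (fun d v => d.insert v (d.getD v 0 + 1)) d) _
      (by intro acc j hjmem
          rw [hdir acc i j]
          exact hA1 acc i j hi (by
            have := (PySem.List.mem_pyRange_one).mp hjmem; omega))).trans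
      (foldl_foldl_eq_flatMap _ _ _)
  exact (PySem.List.foldl_congr_mem _ _
    (fun d i => ((PySem.List.pyRange 0 colCnt 1).flatMap (fun j =>
      pvDirection.flatMap (fun dir => pvWalk mat rowCnt colCnt dir.1 dir.2 F i j 0))).foldl
      (fun d v => d.insert v (d.getD v 0 + 1)) d) _
    (by intro acc i himem
        exact hA2 acc i (by
          have := (PySem.List.mem_pyRange_one).mp himem; omega))).trans
    (foldl_foldl_eq_flatMap _ _ _)

-- A's selection fold is B's running max over the swapped, prime-filtered pairs
theorem pvSel_fold (items : List (Int × Int)) :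
    ∀ (ak av : Int),
      items.foldl (fun s kv =>
        if pvCheckPrime kv.1 then
          (if kv.2 > s.2 ∨ (kv.2 = s.2 ∧ kv.1 > s.1) then (kv.1, kv.2) else s)
        else s) (ak, av) =
      (fun b : Int × Int => (b.2, b.1))
        (((items.filter (fun kv => pvCheckPrime kv.1)).map (fun kv => (kv.2, kv.1))).foldl
          (fun b p => if p.1 > b.1 ∨ (p.1 = b.1 ∧ p.2 > b.2) then p else b) (av, ak)) := by
  induction items with
  | nil => intro ak av; rfl
  | cons kv t ih =>
    intro ak av
    by_cases hp : pvCheckPrime kv.1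
    · simp only [List.foldl_cons, List.filter_cons, hp, if_pos, List.map_cons]
      by_cases hc : kv.2 > av ∨ (kv.2 = av ∧ kv.1 > ak)
      · simpa [hc] using ih kv.1 kv.2
      · simpa [hc] using ih ak av
    · simp only [List.foldl_cons, List.filter_cons, hp]
      simpa [hp] using ih ak av

-- every frequency in a counter built from vals is at least 1
theorem pvFreq_pos (vals : List Int) (kv : Int × Int)
    (h : kv ∈ (PySem.Dict.counter (κ := Int) vals).items) : 1 ≤ kv.2 := by
  rw [PySem.Dict.items_counter] at h
  obtain ⟨k, hk, rfl⟩ := List.mem_map.mp h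
  have hmem : k ∈ vals := (PySem.Set.mem_ofList vals k).mp hk
  have h0 : 0 < vals.count k := List.count_pos_iff.mpr hmem
  show (1 : Int) ≤ ((vals.count k : Nat) : Int)
  exact_mod_cast h0

-- Python max with default (0,-1): over a nonempty list of pairs with positive first
-- components the running max from (0,-1) equals the fold from the head
def pvMaxFrom (pairs : List (Int × Int)) : Int × Int :=
  match pairs with
  | [] => ((0 : Int), (-1 : Int))
  | h :: t => t.foldl (fun b p => if p.1 > b.1 ∨ (p.1 = b.1 ∧ p.2 > b.2) then p else b) h

theorem pvMax_default (pairs : List (Int × Int))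
    (hpos : ∀ p ∈ pairs, 1 ≤ p.1) :
    pairs.foldl (fun b p => if p.1 > b.1 ∨ (p.1 = b.1 ∧ p.2 > b.2) then p else b)
        ((0 : Int), (-1 : Int)) = pvMaxFrom pairs := by
  cases pairs with
  | nil => rfl
  | cons h t =>
    have h1 : 1 ≤ h.1 := hpos h (List.mem_cons_self)
    have hc : h.1 > (0 : Int) ∨ (h.1 = (0 : Int) ∧ h.2 > (-1 : Int)) := Or.inl (by omega)
    simp [pvMaxFrom, hc]

-- ===== VERDICT (by name: the statement is the Claim_ definition above) =====
theorem mostFrequentPrime_spec : Claim_equal_mostFrequentPrime := by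
  intro mat _hdom _hpre
  unfold Spec_mostFrequentPrime mostFrequentPrime mostFrequentPrime_alt
  simp only []
  rw [pvDict_eq mat mat.length (PySem.List.pyGetD mat 0 []).length
    ((mat.length : Int) + (PySem.List.pyGetD mat 0 []).length).toNat]
  set vals : List Int := (PySem.List.pyRange 0 (mat.length : Int) 1).foldl (fun a i =>
      (PySem.List.pyRange 0 ((PySem.List.pyGetD mat 0 []).length : Int) 1).foldl (fun a j =>
        pvDirection.foldl (fun a dir =>
          a ++ pvWalk mat (mat.length : Int) ((PySem.List.pyGetD mat 0 []).length : Int)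
            dir.1 dir.2 ((mat.length : Int) + (PySem.List.pyGetD mat 0 []).length).toNat i j 0) a) a) []
    with hvals
  have hcounter : vals.foldl (fun d v => d.insert v (d.getD v 0 + 1)) PySem.Dict.empty =
      PySem.Dict.counter vals := PySem.Dict.foldl_insert_getD_add_one_eq_counter vals
  rw [hcounter, pvSel_fold]
  rw [pvMax_default _ (by
    intro p hp
    obtain ⟨kv, hkv, rfl⟩ := List.mem_map.mp hp
    exact pvFreq_pos vals kv (List.mem_of_mem_filter hkv))]
  rfl
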